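-- pv_equiv track=rewrite | github.com/MiroVatov/Python-SoftUni | Python Fundamentals 2020 - 2021/04. Functions/10. Array Manipulator ver 2.py | max_odd_index
-- ===== SOURCE A (Python) =====
-- def max_odd_index(array, ar_index):
--     index_max_even_odd = []
--     max_even_odd_num = 0
--     index_pos = []
--     max_odd = [ind for ind in array if ind % 2 != 0]
--     for a in max_odd:
--         if a >= max(max_odd):
--             index_max_even_odd.append(a)
--             max_even_odd_num = a
--     if len(index_max_even_odd) >= 1:
--         index_pos = len(array) - array[::-1].index(max_even_odd_num) - 1
--         return f"{index_pos}"
--     elif len(index_max_even_odd) == 0: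
--         return f"No matches"
-- ===== SOURCE B (Python) =====
-- def max_odd_index(array, ar_index):
--     best = None
--     last_idx = 0
--     for i, v in enumerate(array):
--         if v % 2 != 0:
--             if best is None or v > best:
--                 best = v
--                 last_idx = i
--             elif v == best:
--                 last_idx = i
--     if best is None:
--         return "No matches"
--     return f"{last_idx}"
-- ===== Notes on version B (the rewrite author's own statement) =====
-- stated objective: faster
-- what changed: Replaced A's odd-filter list with per-element max() recomputation plus a reverse-and-.index scan by a single forward pass that maintains the running maximum odd value and its last index.
import Mathlib
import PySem

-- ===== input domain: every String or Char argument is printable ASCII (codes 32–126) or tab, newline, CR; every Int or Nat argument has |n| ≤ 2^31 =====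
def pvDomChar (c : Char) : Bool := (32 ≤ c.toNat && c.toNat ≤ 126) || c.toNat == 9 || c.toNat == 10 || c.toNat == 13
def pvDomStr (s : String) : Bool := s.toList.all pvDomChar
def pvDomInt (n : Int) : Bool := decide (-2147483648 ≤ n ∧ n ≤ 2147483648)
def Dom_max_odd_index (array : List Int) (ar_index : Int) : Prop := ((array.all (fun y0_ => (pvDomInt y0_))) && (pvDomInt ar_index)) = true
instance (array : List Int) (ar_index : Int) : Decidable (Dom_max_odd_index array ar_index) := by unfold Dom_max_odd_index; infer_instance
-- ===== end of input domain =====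

-- B replaces A's filter-list + per-element max() recomputation + reverse-and-.index scan by one
-- forward pass that maintains the running maximum odd value and its last index (objective: faster; measured on odd-heavy inputs).

-- ===== PORT A =====
-- loop body: recomputes max(max_odd) on every iteration, as A does
def aStep (max_odd : List Int) (st : List Int × Int) (a : Int) : List Int × Int :=
  if a ≥ (PySem.List.max? max_odd (fun y => y)).getD 0 then (st.1 ++ [a], a) else st

def max_odd_index (array : List Int) (ar_index : Int) : String :=
  let max_odd := array.filter (fun ind => PySem.Int.mod ind 2 != 0)
  let st := max_odd.foldl (aStep max_odd) ([], 0)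
  if st.1.length ≥ 1 then
    -- array[::-1].index(v): found whenever this branch is taken, so .getD 0 is unreachable
    PySem.Int.toStr ((array.length : Int) -
      ((PySem.List.index? ((PySem.List.slice? array none none (-1)).getD []) st.2).getD 0 : Int) - 1)
  else "No matches"

-- ===== PORT B =====
-- loop body of B's single pass: state = (best : Option Int, last_idx : Int)
def bStep (st : Option Int × Int) (p : Int × Int) : Option Int × Int :=
  if PySem.Int.mod p.2 2 != 0 then
    match st.1 with
    | none => (some p.2, p.1)
    | some b => if p.2 > b then (some p.2, p.1) else if p.2 == b then (st.1, p.1) else st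
  else st

def max_odd_index_alt (array : List Int) (ar_index : Int) : String :=
  let st := (PySem.List.enumerate array 0).foldl bStep (none, 0)
  match st.1 with
  | none => "No matches"
  | some _ => PySem.Int.toStr st.2

-- ===== PRECONDITION & SPEC =====
def Spec_max_odd_index (array : List Int) (ar_index : Int) (out : String) : Prop := out = max_odd_index_alt array ar_index
instance (array : List Int) (ar_index : Int) (out : String) : Decidable (Spec_max_odd_index array ar_index out) := by unfold Spec_max_odd_index; infer_instance

-- ===== CLAIM (what is proved, stated in full; the proofs are below) =====
def Claim_equal_max_odd_index : Prop := ∀ (array : List Int) (ar_index : Int), Dom_max_odd_index array ar_index → Spec_max_odd_index array ar_index (max_odd_index array ar_index)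

-- ===== LEMMAS AND PROOFS =====

-- common reference value: "No matches" if no odd element, else the last index of the maximum odd value
def refOut (xs : List Int) : String :=
  match PySem.List.max? (xs.filter (fun v => PySem.Int.mod v 2 != 0)) (fun y => y) with
  | none => "No matches"
  | some m => PySem.Int.toStr ((xs.length : Int) -
      ((PySem.List.index? xs.reverse m).getD 0 : Int) - 1)

lemma max?_append_singleton (os : List Int) (x mx : Int)
    (h : PySem.List.max? os (fun y => y) = some mx) :
    PySem.List.max? (os ++ [x]) (fun y => y) = some (max mx x) := by
  have hne : os ++ [x] ≠ [] := by simp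
  obtain ⟨m', hm'⟩ : ∃ m', PySem.List.max? (os ++ [x]) (fun y => y) = some m' := by
    cases hmm : PySem.List.max? (os ++ [x]) (fun y => y) with
    | none => exact absurd ((PySem.List.max?_eq_none_iff _ _).mp hmm) hne
    | some m' => exact ⟨m', rfl⟩
  have hmem' : m' ∈ os ++ [x] := PySem.List.max?_mem hm'
  have hmax' := PySem.List.max?_isMax hm'
  have hmxmem : mx ∈ os := PySem.List.max?_mem h
  have hmax := PySem.List.max?_isMax h
  have h1 : m' ≤ max mx x := by
    rcases List.mem_append.mp hmem' with hl | hr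
    · exact le_trans (hmax _ hl) (le_max_left _ _)
    · simp at hr; simp [hr]
  have h2 : max mx x ≤ m' := by
    rcases max_cases mx x with ⟨he, _⟩ | ⟨he, _⟩ <;> rw [he]
    · exact hmax' _ (List.mem_append.mpr (Or.inl hmxmem))
    · exact hmax' _ (by simp)
  rw [hm', le_antisymm h1 h2]

-- the invariant of A's loop, with the recomputed max pinned to m
lemma aFold_inv (os : List Int) (m : Int)
    (hmax : (PySem.List.max? os (fun y => y)).getD 0 = m) :
    ∀ (os' : List Int) (l : List Int) (c : Int),
      (∀ y ∈ os', y ≤ m) →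
      (m ∈ os' ∨ (c = m ∧ l ≠ [])) →
      (os'.foldl (aStep os) (l, c)).2 = m ∧ (os'.foldl (aStep os) (l, c)).1 ≠ [] := by
  intro os'
  induction os' with
  | nil =>
    intro l c _ hd
    rcases hd with hd | hd
    · simp at hd
    · simpa using hd
  | cons a t ih =>
    intro l c hle hd
    have ham : a ≤ m := hle a (by simp)
    by_cases hge : a ≥ m
    · have haeq : a = m := le_antisymm ham hge
      have hstep : (a :: t).foldl (aStep os) (l, c) = t.foldl (aStep os) (l ++ [a], a) := by
        simp only [List.foldl_cons, aStep, hmax, if_pos hge]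
      rw [hstep]
      exact ih (l ++ [a]) a (fun y hy => hle y (by simp [hy])) (Or.inr ⟨haeq, by simp⟩)
    · have hstep : (a :: t).foldl (aStep os) (l, c) = t.foldl (aStep os) (l, c) := by
        simp only [List.foldl_cons, aStep, hmax, if_neg hge]
      rw [hstep]
      refine ih l c (fun y hy => hle y (by simp [hy])) ?_
      rcases hd with hd | hd
      · rcases List.mem_cons.mp hd with he | hm
        · exact absurd (ge_of_eq he.symm) hge
        · exact Or.inl hm
      · exact Or.inr hd

lemma portA_eq_ref (array : List Int) (ar_index : Int) :
    max_odd_index array ar_index = refOut array := by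
  unfold max_odd_index refOut
  cases hmm : PySem.List.max? (array.filter (fun v => PySem.Int.mod v 2 != 0)) (fun y => y) with
  | none =>
    have hnil : array.filter (fun v => PySem.Int.mod v 2 != 0) = [] :=
      (PySem.List.max?_eq_none_iff _ _).mp hmm
    simp only [hnil, List.foldl_nil]
    norm_num
  | some m =>
    have hmem : m ∈ array.filter (fun v => PySem.Int.mod v 2 != 0) := PySem.List.max?_mem hmm
    have hmax := PySem.List.max?_isMax hmm
    obtain ⟨h2, h1⟩ := aFold_inv _ m (by rw [hmm]; rfl) _ [] 0 (fun y hy => hmax y hy)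
      (Or.inl hmem)
    have hlen : (List.foldl (aStep (array.filter (fun v => PySem.Int.mod v 2 != 0)))
        ([], 0) (array.filter (fun v => PySem.Int.mod v 2 != 0))).1.length ≥ 1 := by
      cases hfl : (List.foldl (aStep (array.filter (fun v => PySem.Int.mod v 2 != 0)))
          ([], 0) (array.filter (fun v => PySem.Int.mod v 2 != 0))).1 with
      | nil => exact absurd hfl h1
      | cons _ _ => simp
    simp only [PySem.List.slice?_none_none_neg_one, Option.getD_some, h2, hlen, if_pos]

-- B's loop computes (max odd value, its last index) — by induction from the back
lemma bFold (xs : List Int) :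
    (PySem.List.enumerate xs 0).foldl bStep (none, 0) =
      (match PySem.List.max? (xs.filter (fun v => PySem.Int.mod v 2 != 0)) (fun y => y) with
       | none => ((none : Option Int), (0 : Int))
       | some m => (some m, (xs.length : Int) - ((PySem.List.index? xs.reverse m).getD 0 : Int) - 1)) := by
  induction xs using List.reverseRecOn with
  | nil => simp [PySem.List.enumerate, PySem.List.max?]
  | append_singleton xs x ih =>
    have henum : PySem.List.enumerate (xs ++ [x]) 0 =
        PySem.List.enumerate xs 0 ++ [((xs.length : Int), x)] := by
      rw [PySem.List.enumerate_append]
      simp [PySem.List.enumerate_cons, PySem.List.enumerate_nil]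
    rw [henum, List.foldl_append, ih]
    have hrev : (xs ++ [x]).reverse = x :: xs.reverse := by simp
    have hmodeq : PySem.Int.mod x 2 = x % 2 := PySem.Int.mod_eq_emod_of_pos (by norm_num)
    by_cases hx : PySem.Int.mod x 2 = 0
    · -- x is even: the state and the odd filter are unchanged, reverse indices shift by one
      have heven' : x % 2 = 0 := by rw [hmodeq] at hx; exact hx
      have hfx : (xs ++ [x]).filter (fun v => PySem.Int.mod v 2 != 0) =
          xs.filter (fun v => PySem.Int.mod v 2 != 0) := by
        rw [List.filter_append]; simp [heven']
      rw [hfx]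
      cases hmm : PySem.List.max? (xs.filter (fun v => PySem.Int.mod v 2 != 0)) (fun y => y) with
      | none =>
        dsimp only [List.foldl]
        simp [bStep, heven']
      | some m =>
        have hmodd : PySem.Int.mod m 2 ≠ 0 := by
          simpa using List.of_mem_filter (PySem.List.max?_mem hmm)
        have hne : x ≠ m := fun he => hmodd (he ▸ hx)
        have hmrev : m ∈ xs.reverse :=
          List.mem_reverse.mpr (List.mem_of_mem_filter (PySem.List.max?_mem hmm))
        obtain ⟨k, hk⟩ := Option.isSome_iff_exists.mp
          ((PySem.List.index?_isSome_iff _ _).mpr hmrev)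
        dsimp only [List.foldl]
        rw [hrev, PySem.List.index?_cons_of_ne _ hne, hk]
        simp [bStep, heven', List.length_append]
    · -- x is odd
      have hodd' : x % 2 = 1 := by rw [hmodeq] at hx; omega
      have hfx : (xs ++ [x]).filter (fun v => PySem.Int.mod v 2 != 0) =
          xs.filter (fun v => PySem.Int.mod v 2 != 0) ++ [x] := by
        rw [List.filter_append]; simp [hodd']
      cases hmm : PySem.List.max? (xs.filter (fun v => PySem.Int.mod v 2 != 0)) (fun y => y) with
      | none =>
        have hnil : xs.filter (fun v => PySem.Int.mod v 2 != 0) = [] :=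
          (PySem.List.max?_eq_none_iff _ _).mp hmm
        have hfx1 : (xs ++ [x]).filter (fun v => PySem.Int.mod v 2 != 0) = [x] := by
          rw [hfx, hnil]; rfl
        rw [hfx1, PySem.List.max?_id_cons]
        dsimp only [List.foldl]
        rw [hrev, PySem.List.index?_cons_self]
        simp [bStep, hodd', List.length_append]
      | some mx =>
        have hmax' : PySem.List.max? ((xs ++ [x]).filter (fun v => PySem.Int.mod v 2 != 0))
            (fun y => y) = some (max mx x) := by
          rw [hfx]; exact max?_append_singleton _ x mx hmm
        rw [hmax']
        have hmxrev : mx ∈ xs.reverse :=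
          List.mem_reverse.mpr (List.mem_of_mem_filter (PySem.List.max?_mem hmm))
        obtain ⟨k, hk⟩ := Option.isSome_iff_exists.mp
          ((PySem.List.index?_isSome_iff _ _).mpr hmxrev)
        rcases lt_trichotomy mx x with hlt | heq | hgt
        · -- x > mx : new best, at the end
          rw [max_eq_right (le_of_lt hlt)]
          dsimp only [List.foldl]
          rw [hrev, PySem.List.index?_cons_self]
          simp [bStep, hodd', hlt, List.length_append]
        · -- x == mx : same best, last index moves to the end
          subst heq
          rw [max_self]
          dsimp only [List.foldl]
          rw [hrev, PySem.List.index?_cons_self]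
          simp [bStep, hodd', List.length_append]
        · -- x < mx : state unchanged, reverse index shifts by one
          have hne : x ≠ mx := ne_of_lt hgt
          have hngt : ¬ x > mx := not_lt.mpr (le_of_lt hgt)
          rw [max_eq_left (le_of_lt hgt)]
          dsimp only [List.foldl]
          rw [hrev, PySem.List.index?_cons_of_ne _ hne, hk]
          simp [bStep, hodd', hngt, hne, List.length_append]

lemma portB_eq_ref (array : List Int) (ar_index : Int) :
    max_odd_index_alt array ar_index = refOut array := by
  unfold max_odd_index_alt refOut
  rw [bFold]
  cases PySem.List.max? (array.filter (fun v => PySem.Int.mod v 2 != 0)) (fun y => y) <;> simp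

-- ===== VERDICT (by name: the statement is the Claim_ definition above) =====
theorem max_odd_index_spec : Claim_equal_max_odd_index := by
  intro array ar_index _
  unfold Spec_max_odd_index
  rw [portA_eq_ref array ar_index, portB_eq_ref array ar_index]
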